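-- pv_equiv track=rewrite | github.com/gregchapman-dev/converter21 | diffall.py | oplistSummary
-- ===== SOURCE A (Python) =====
-- from typing import List, Tuple
--
-- def oplistSummary(op_list: List[Tuple[str]]) -> str:
--     output: str = ''
--     counts: dict = dict()
--
--     counts['measure'] = 0
--     counts['voice'] = 0
--     counts['note'] = 0
--     counts['beam'] = 0
--     counts['accidental'] = 0
--     counts['tuplet'] = 0
--     counts['tie'] = 0
--     counts['expression'] = 0
--     counts['articulation'] = 0
--
--     for op in op_list:
--         # measure
--         if (op[0] == 'insbar' or
--                 op[0] == 'delbar'):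
--             counts['measure'] += 1
--         # voice
--         elif (op[0] == 'voiceins' or
--                 op[0] == 'voicedel'):
--             counts['voice'] += 1
--         # note
--         elif (op[0] == 'noteins' or
--                 op[0] == 'notedel' or
--                 op[0] == 'pitchnameedit' or
--                 op[0] == 'inspitch' or
--                 op[0] == 'delpitch' or
--                 op[0] == 'headedit' or
--                 op[0] == 'dotins' or
--                 op[0] == 'dotdel'):
--             counts['note'] += 1
--         # beam
--         elif (op[0] == 'insbeam' or
--                 op[0] == 'delbeam' or
--                 op[0] == 'editbeam'):
--             counts['beam'] += 1
--         # accidental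
--         elif (op[0] == 'accidentins' or
--                 op[0] == 'accidentdel' or
--                 op[0] == 'accidentedit'):
--             counts['accidental'] += 1
--         # tuplet
--         elif (op[0] == 'instuplet' or
--                 op[0] == 'deltuplet' or
--                 op[0] == 'edittuplet'):
--             counts['tuplet'] += 1
--         # tie
--         elif (op[0] == 'tieins' or
--                 op[0] == 'tiedel'):
--             counts['tie'] += 1
--         # expression
--         elif (op[0] == 'insexpression' or
--                 op[0] == 'delexpression' or
--                 op[0] == 'editexpression'):
--             counts['expression'] += 1
--         # articulation
--         elif (op[0] == 'insarticulation' or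
--                 op[0] == 'delarticulation' or
--                 op[0] == 'editarticulation'):
--             counts['articulation'] += 1
--
--     firstDone: bool = False
--     for k, v in counts.items():
--         if v == 0:
--             continue
--
--         if firstDone:
--             output += f', {k}:{v}'
--         else:
--             output += f'{k}:{v}'
--             firstDone = True
--
--     return output
-- ===== SOURCE B (Python) =====
-- # Category-major re-implementation: project the op heads once, then tally each
-- # category by summing list.count of its op names (staged passes, no counts dict).
-- CATS = [
--     ('measure', ['insbar', 'delbar']),
--     ('voice', ['voiceins', 'voicedel']),
--     ('note', ['noteins', 'notedel', 'pitchnameedit', 'inspitch', 'delpitch',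
--               'headedit', 'dotins', 'dotdel']),
--     ('beam', ['insbeam', 'delbeam', 'editbeam']),
--     ('accidental', ['accidentins', 'accidentdel', 'accidentedit']),
--     ('tuplet', ['instuplet', 'deltuplet', 'edittuplet']),
--     ('tie', ['tieins', 'tiedel']),
--     ('expression', ['insexpression', 'delexpression', 'editexpression']),
--     ('articulation', ['insarticulation', 'delarticulation', 'editarticulation']),
-- ]
--
-- def oplistSummary(op_list):
--     heads = [op[0] for op in op_list]
--     parts = []
--     for name, ops in CATS:
--         n = sum(heads.count(o) for o in ops)
--         if n != 0:
--             parts.append(f'{name}:{n}')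
--     return ', '.join(parts)
-- ===== Notes on version B (the rewrite author's own statement) =====
-- stated objective: alternative
-- what changed: Instead of A's single pass that classifies each op through a nine-way elif chain into a mutable counts dict, B projects the op heads once and tallies category-major: for each category it sums list.count of its op names (staged counting passes), appending nonzero parts and joining them.
import Mathlib
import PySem

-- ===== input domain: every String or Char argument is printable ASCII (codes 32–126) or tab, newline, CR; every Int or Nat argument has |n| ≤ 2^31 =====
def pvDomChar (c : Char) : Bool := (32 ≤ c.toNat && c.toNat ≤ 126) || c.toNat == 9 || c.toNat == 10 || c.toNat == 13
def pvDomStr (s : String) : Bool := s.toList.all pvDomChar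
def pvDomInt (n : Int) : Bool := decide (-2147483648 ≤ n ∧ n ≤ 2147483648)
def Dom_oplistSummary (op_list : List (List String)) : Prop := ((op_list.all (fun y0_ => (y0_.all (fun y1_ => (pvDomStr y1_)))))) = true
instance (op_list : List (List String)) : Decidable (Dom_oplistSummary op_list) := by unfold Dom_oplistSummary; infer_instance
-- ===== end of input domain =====

-- B tallies category-major (one list.count pass per op name, summed per category) instead of A's
-- single elif-chain pass into a counts dict (objective: alternative decomposition).
-- ===== PORT A =====
-- the body of A's counting loop (the elif chain over op[0])
def stepA (counts : PySem.Dict String Int) (op : List String) : PySem.Dict String Int :=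
  match PySem.List.pyGet? op 0 with
  | none => counts            -- Python raises IndexError here; excluded by Pre_
  | some s =>
    if s == "insbar" || s == "delbar" then counts.modify "measure" 0 (· + 1)
    else if s == "voiceins" || s == "voicedel" then counts.modify "voice" 0 (· + 1)
    else if s == "noteins" || s == "notedel" || s == "pitchnameedit" || s == "inspitch" ||
        s == "delpitch" || s == "headedit" || s == "dotins" || s == "dotdel" then
      counts.modify "note" 0 (· + 1)
    else if s == "insbeam" || s == "delbeam" || s == "editbeam" then counts.modify "beam" 0 (· + 1)
    else if s == "accidentins" || s == "accidentdel" || s == "accidentedit" then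
      counts.modify "accidental" 0 (· + 1)
    else if s == "instuplet" || s == "deltuplet" || s == "edittuplet" then
      counts.modify "tuplet" 0 (· + 1)
    else if s == "tieins" || s == "tiedel" then counts.modify "tie" 0 (· + 1)
    else if s == "insexpression" || s == "delexpression" || s == "editexpression" then
      counts.modify "expression" 0 (· + 1)
    else if s == "insarticulation" || s == "delarticulation" || s == "editarticulation" then
      counts.modify "articulation" 0 (· + 1)
    else counts

-- counts['measure'] = 0; counts['voice'] = 0; … (nine successive insertions into an empty dict)
def initCountsA : PySem.Dict String Int :=
  ((((((((PySem.Dict.empty.insert "measure" 0).insert "voice" 0).insert "note" 0).insert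
    "beam" 0).insert "accidental" 0).insert "tuplet" 0).insert "tie" 0).insert
    "expression" 0).insert "articulation" 0

-- the output loop with its firstDone flag
def fmtLoopA : List (String × Int) → String → Bool → String
  | [], out, _ => out
  | (k, v) :: rest, out, firstDone =>
    if v == 0 then fmtLoopA rest out firstDone
    else if firstDone then fmtLoopA rest (out ++ (", " ++ k ++ ":" ++ PySem.Int.toStr v)) true
    else fmtLoopA rest (out ++ (k ++ ":" ++ PySem.Int.toStr v)) true

def oplistSummary (op_list : List (List String)) : String :=
  fmtLoopA ((op_list.foldl stepA initCountsA).items) "" false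

-- ===== PORT B =====
def CATS : List (String × List String) :=
  [("measure", ["insbar", "delbar"]),
   ("voice", ["voiceins", "voicedel"]),
   ("note", ["noteins", "notedel", "pitchnameedit", "inspitch", "delpitch",
             "headedit", "dotins", "dotdel"]),
   ("beam", ["insbeam", "delbeam", "editbeam"]),
   ("accidental", ["accidentins", "accidentdel", "accidentedit"]),
   ("tuplet", ["instuplet", "deltuplet", "edittuplet"]),
   ("tie", ["tieins", "tiedel"]),
   ("expression", ["insexpression", "delexpression", "editexpression"]),
   ("articulation", ["insarticulation", "delarticulation", "editarticulation"])]

-- the body of B's loop over CATS: n = sum(heads.count(o) for o in ops); if n != 0: parts.append(...)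
def stepB (heads : List String) (parts : List String) (c : String × List String) : List String :=
  let n : Int := (c.2.map (fun o => (PySem.List.count heads o : Int))).sum
  if n != 0 then parts ++ [c.1 ++ ":" ++ PySem.Int.toStr n] else parts

def oplistSummary_alt (op_list : List (List String)) : String :=
  -- heads = [op[0] for op in op_list]; the "" default is unreachable under Pre_ (op[0] raises there)
  let heads := op_list.map (fun op => PySem.List.pyGetD op 0 "")
  PySem.Str.join ", " (CATS.foldl (stepB heads) [])

-- ===== PRECONDITION & SPEC =====
-- Pre_ excludes op lists containing an empty op tuple, on which A (and B) raise IndexError at op[0].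
def Pre_oplistSummary (op_list : List (List String)) : Prop := ∀ op ∈ op_list, op ≠ []
instance (op_list : List (List String)) : Decidable (Pre_oplistSummary op_list) := by unfold Pre_oplistSummary; infer_instance
def pvWitness_oplistSummary : List (List String) := [["insbar"], ["noteins", "x"], ["zzz"]]
def Spec_oplistSummary (op_list : List (List String)) (out : String) : Prop := out = oplistSummary_alt op_list
instance (op_list : List (List String)) (out : String) : Decidable (Spec_oplistSummary op_list out) := by unfold Spec_oplistSummary; infer_instance

-- ===== CLAIM (what is proved, stated in full; the proofs are below) =====
def Claim_equal_oplistSummary : Prop := ∀ (op_list : List (List String)), Dom_oplistSummary op_list → Pre_oplistSummary op_list → Spec_oplistSummary op_list (oplistSummary op_list)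

-- ===== LEMMAS AND PROOFS =====

-- the head A's elif chain and B's counting both classify
def pvHd (op : List String) : String := PySem.List.pyGetD op 0 ""

-- number of ops in op's list l whose head lies in ops (Int-valued, as both programs count)
def pvC (ops : List String) (l : List (List String)) : Int :=
  ((l.map pvHd).countP (fun h => decide (h ∈ ops)) : Nat)

def dict9 (a1 a2 a3 a4 a5 a6 a7 a8 a9 : Int) : PySem.Dict String Int :=
  PySem.Dict.mk [("measure", a1), ("voice", a2), ("note", a3), ("beam", a4),
    ("accidental", a5), ("tuplet", a6), ("tie", a7), ("expression", a8), ("articulation", a9)]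

def pvInd (ops : List String) (op : List String) : Int := if pvHd op ∈ ops then 1 else 0

set_option maxHeartbeats 1000000 in
theorem stepA_dict9 (a1 a2 a3 a4 a5 a6 a7 a8 a9 : Int) (op : List String) :
    stepA (dict9 a1 a2 a3 a4 a5 a6 a7 a8 a9) op =
      dict9 (a1 + pvInd ["insbar", "delbar"] op)
            (a2 + pvInd ["voiceins", "voicedel"] op)
            (a3 + pvInd ["noteins", "notedel", "pitchnameedit", "inspitch", "delpitch",
                         "headedit", "dotins", "dotdel"] op)
            (a4 + pvInd ["insbeam", "delbeam", "editbeam"] op)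
            (a5 + pvInd ["accidentins", "accidentdel", "accidentedit"] op)
            (a6 + pvInd ["instuplet", "deltuplet", "edittuplet"] op)
            (a7 + pvInd ["tieins", "tiedel"] op)
            (a8 + pvInd ["insexpression", "delexpression", "editexpression"] op)
            (a9 + pvInd ["insarticulation", "delarticulation", "editarticulation"] op) := by
  have hget : pvHd op = (PySem.List.pyGet? op 0).getD "" := rfl
  unfold stepA pvInd
  cases hs : PySem.List.pyGet? op 0 with
  | none =>
    rw [hget, hs]
    simp [dict9]
  | some s =>
    rw [hget, hs]
    dsimp only [Option.getD]
    by_cases h1 : (s == "insbar" || s == "delbar") = true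
    · rcases (by simpa using h1) with (h|h) <;> subst h <;> (simp [dict9]; rfl)
    by_cases h2 : (s == "voiceins" || s == "voicedel") = true
    · rcases (by simpa using h2) with (h|h) <;> subst h <;> (simp [dict9]; rfl)
    by_cases h3 : (s == "noteins" || s == "notedel" || s == "pitchnameedit" || s == "inspitch" || s == "delpitch" || s == "headedit" || s == "dotins" || s == "dotdel") = true
    · rcases (by simpa using h3) with (((((((h|h)|h)|h)|h)|h)|h)|h) <;> subst h <;> (simp [dict9]; rfl)
    by_cases h4 : (s == "insbeam" || s == "delbeam" || s == "editbeam") = true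
    · rcases (by simpa using h4) with ((h|h)|h) <;> subst h <;> (simp [dict9]; rfl)
    by_cases h5 : (s == "accidentins" || s == "accidentdel" || s == "accidentedit") = true
    · rcases (by simpa using h5) with ((h|h)|h) <;> subst h <;> (simp [dict9]; rfl)
    by_cases h6 : (s == "instuplet" || s == "deltuplet" || s == "edittuplet") = true
    · rcases (by simpa using h6) with ((h|h)|h) <;> subst h <;> (simp [dict9]; rfl)
    by_cases h7 : (s == "tieins" || s == "tiedel") = true
    · rcases (by simpa using h7) with (h|h) <;> subst h <;> (simp [dict9]; rfl)
    by_cases h8 : (s == "insexpression" || s == "delexpression" || s == "editexpression") = true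
    · rcases (by simpa using h8) with ((h|h)|h) <;> subst h <;> (simp [dict9]; rfl)
    by_cases h9 : (s == "insarticulation" || s == "delarticulation" || s == "editarticulation") = true
    · rcases (by simpa using h9) with ((h|h)|h) <;> subst h <;> (simp [dict9]; rfl)
    rw [if_neg (by simpa using h1), if_neg (by simpa using h2), if_neg (by simpa using h3),
        if_neg (by simpa using h4), if_neg (by simpa using h5), if_neg (by simpa using h6),
        if_neg (by simpa using h7), if_neg (by simpa using h8), if_neg (by simpa using h9)]
    simp only [Bool.not_eq_true, Bool.or_eq_false_iff, beq_eq_false_iff_ne] at h1 h2 h3 h4 h5 h6 h7 h8 h9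
    simp [dict9, List.mem_cons, h1.1, h1.2, h2.1, h2.2,
      h3.1.1.1.1.1.1.1, h3.1.1.1.1.1.1.2, h3.1.1.1.1.1.2, h3.1.1.1.1.2, h3.1.1.1.2, h3.1.1.2, h3.1.2, h3.2,
      h4.1.1, h4.1.2, h4.2, h5.1.1, h5.1.2, h5.2, h6.1.1, h6.1.2, h6.2, h7.1, h7.2,
      h8.1.1, h8.1.2, h8.2, h9.1.1, h9.1.2, h9.2]

theorem pvC_cons (ops : List String) (op : List String) (t : List (List String)) :
    pvC ops (op :: t) = pvC ops t + pvInd ops op := by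
  unfold pvC pvInd
  by_cases h : pvHd op ∈ ops
  · simp only [List.map_cons, List.countP_cons, h, decide_true, if_pos]
    push_cast
    ring
  · simp [h]

theorem foldl_stepA (l : List (List String)) :
    ∀ a1 a2 a3 a4 a5 a6 a7 a8 a9 : Int,
    l.foldl stepA (dict9 a1 a2 a3 a4 a5 a6 a7 a8 a9) =
      dict9 (a1 + pvC ["insbar", "delbar"] l)
            (a2 + pvC ["voiceins", "voicedel"] l)
            (a3 + pvC ["noteins", "notedel", "pitchnameedit", "inspitch", "delpitch",
                       "headedit", "dotins", "dotdel"] l)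
            (a4 + pvC ["insbeam", "delbeam", "editbeam"] l)
            (a5 + pvC ["accidentins", "accidentdel", "accidentedit"] l)
            (a6 + pvC ["instuplet", "deltuplet", "edittuplet"] l)
            (a7 + pvC ["tieins", "tiedel"] l)
            (a8 + pvC ["insexpression", "delexpression", "editexpression"] l)
            (a9 + pvC ["insarticulation", "delarticulation", "editarticulation"] l) := by
  induction l with
  | nil => intro _ _ _ _ _ _ _ _ _; simp [pvC]
  | cons op t ih =>
    intro a1 a2 a3 a4 a5 a6 a7 a8 a9
    rw [List.foldl_cons, stepA_dict9, ih]
    simp only [pvC_cons]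
    ring_nf

-- A's filled counts dict, item by item: the key of each category with its head count
theorem itemsA (l : List (List String)) :
    (l.foldl stepA initCountsA).items = CATS.map (fun c => (c.1, pvC c.2 l)) := by
  rw [show initCountsA = dict9 0 0 0 0 0 0 0 0 0 from by decide, foldl_stepA]
  simp [dict9, CATS]

-- the two presentations of the nonzero categories produce the same formatted pieces
theorem filter_map_eq (V : String × List String → Int) (cs : List (String × List String)) :
    (((cs.map (fun c => (c.1, V c))).filter (fun p => p.2 != 0)).map
        (fun p => (p.1 ++ ":" ++ PySem.Int.toStr p.2).toList)) =
      ((cs.filter (fun c => V c != 0)).map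
        (fun c => (c.1 ++ ":" ++ PySem.Int.toStr (V c)).toList)) := by
  induction cs with
  | nil => rfl
  | cons c t ih =>
    by_cases h : V c = 0 <;> simpa [List.filter_cons, h] using ih

-- countP for membership in (o :: os) splits off count of o when o is not in os
theorem countP_cons_mem (o : String) (os : List String) (ho : o ∉ os) (L : List String) :
    L.countP (fun h => decide (h ∈ o :: os)) = L.count o + L.countP (fun h => decide (h ∈ os)) := by
  induction L with
  | nil => simp
  | cons h t ih =>
    simp only [List.countP_cons, List.count_cons, ih]
    by_cases h1 : h = o
    · subst h1; simp [ho]; omega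
    · by_cases h2 : h ∈ os
      · simp [h1, h2, List.mem_cons]
        omega
      · simp [h1, h2, List.mem_cons]

-- per-category: B's sum of list.count over the (distinct) op names is the head count pvC
theorem sumB_eq_pvC (ops : List String) (hnd : ops.Nodup) (op_list : List (List String)) :
    ((ops.map (fun o =>
        (PySem.List.count (op_list.map (fun op => PySem.List.pyGetD op 0 "")) o : Int))).sum) =
      pvC ops op_list := by
  unfold pvC
  rw [show (op_list.map fun op => PySem.List.pyGetD op 0 "") = op_list.map pvHd from rfl]
  induction ops with
  | nil => simp
  | cons o os ih =>
    have ho : o ∉ os := (List.nodup_cons.mp hnd).1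
    have ih' := ih (List.nodup_cons.mp hnd).2
    simp only [PySem.List.count_eq] at ih' ⊢
    rw [List.map_cons, List.sum_cons, ih', countP_cons_mem o os ho]
    push_cast
    ring

theorem chars_join_sep (sep : List Char) (rest : List (List Char)) (p : List Char) :
    PySem.Chars.join sep (p :: rest) = p ++ (rest.map (fun q => sep ++ q)).flatten := by
  induction rest generalizing p with
  | nil => simp [PySem.Chars.join_singleton]
  | cons q t ih => rw [PySem.Chars.join_cons_cons, ih]; simp [List.append_assoc]

theorem fmtLoopA_true (l : List (String × Int)) (out : String) :
    (fmtLoopA l out true).toList =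
      out.toList ++ ((l.filter (fun p => p.2 != 0)).map
        (fun p => (", " ++ p.1 ++ ":" ++ PySem.Int.toStr p.2).toList)).flatten := by
  induction l generalizing out with
  | nil => simp [fmtLoopA]
  | cons p t ih =>
    obtain ⟨k, v⟩ := p
    by_cases hv : v = 0
    · simp [fmtLoopA, hv, ih]
    · simp [fmtLoopA, hv, ih, List.append_assoc]

theorem fmtLoopA_false (l : List (String × Int)) (out : String) :
    (fmtLoopA l out false).toList =
      out.toList ++ PySem.Chars.join (", ".toList)
        ((l.filter (fun p => p.2 != 0)).map
          (fun p => (p.1 ++ ":" ++ PySem.Int.toStr p.2).toList)) := by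
  induction l generalizing out with
  | nil => simp [fmtLoopA, PySem.Chars.join_nil]
  | cons p t ih =>
    obtain ⟨k, v⟩ := p
    by_cases hv : v = 0
    · simp [fmtLoopA, hv, ih]
    · rw [show fmtLoopA ((k, v) :: t) out false =
            fmtLoopA t (out ++ (k ++ ":" ++ PySem.Int.toStr v)) true from by simp [fmtLoopA, hv]]
      rw [fmtLoopA_true]
      simp [hv, chars_join_sep, List.append_assoc, Function.comp_def]

-- ===== VERDICT (by name: the statement is the Claim_ definition above) =====
set_option maxHeartbeats 1000000 in
theorem oplistSummary_spec : Claim_equal_oplistSummary := by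
  intro op_list _ _
  unfold Spec_oplistSummary oplistSummary oplistSummary_alt
  apply String.toList_inj.mp
  rw [fmtLoopA_false, itemsA, PySem.Str.toList_join]
  rw [show stepB (op_list.map (fun op => PySem.List.pyGetD op 0 "")) =
        (fun parts c =>
          if ((c.2.map (fun o => (PySem.List.count (op_list.map (fun op => PySem.List.pyGetD op 0 "")) o : Int))).sum != 0)
          then parts ++ [c.1 ++ ":" ++ PySem.Int.toStr ((c.2.map (fun o => (PySem.List.count (op_list.map (fun op => PySem.List.pyGetD op 0 "")) o : Int))).sum)]
          else parts) from rfl,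
      PySem.List.foldl_append_if]
  have hmem : ∀ c ∈ CATS,
      ((c.2.map (fun o => (PySem.List.count (op_list.map (fun op => PySem.List.pyGetD op 0 "")) o : Int))).sum) =
        pvC c.2 op_list := by
    intro c hc
    fin_cases hc <;> exact sumB_eq_pvC _ (by decide) op_list
  rw [List.filter_congr (fun c hc => by simp only [hmem c hc] :
        ∀ c ∈ CATS, ((fun c => ((c.2.map (fun o => (PySem.List.count (op_list.map (fun op => PySem.List.pyGetD op 0 "")) o : Int))).sum != 0)) c =
          (fun c => (pvC c.2 op_list != 0)) c))]
  rw [List.map_congr_left (fun c hc => by simp only [hmem c (List.mem_of_mem_filter hc)] :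
        ∀ c ∈ CATS.filter (fun c => (pvC c.2 op_list != 0)),
          ((fun c => c.1 ++ ":" ++ PySem.Int.toStr ((c.2.map (fun o => (PySem.List.count (op_list.map (fun op => PySem.List.pyGetD op 0 "")) o : Int))).sum)) c =
           (fun c => c.1 ++ ":" ++ PySem.Int.toStr (pvC c.2 op_list)) c))]
  rw [List.nil_append, List.map_map]
  exact congrArg (fun L => "".toList ++ PySem.Chars.join ", ".toList L)
    (filter_map_eq (fun c => pvC c.2 op_list) CATS)
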